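-- pv_equiv track=rewrite | github.com/JSoi/Algorithm_Python | programmers/60058.py | solution
-- ===== SOURCE A (Python) =====
-- def solution(p):
--     answer = ''
--
--     def balanced(string):
--         if string.count('(') == string.count(')'):  # 균형잡힌
--             return True
--         else:
--             return False
--
--     def correct(string):
--         if not balanced(string):
--             return False
--         garo = 0
--         for i in range(len(string)):
--             now = string[i]
--             if now == '(':
--                 garo += 1
--             elif now == ')':
--                 garo -= 1
--             if garo < 0:
--                 return False
--         if garo != 0:
--             return False
--         return True
--
--     def trimandreverse(string):
--         trimstring = string[1:len(string) - 1]
--         a = ''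
--         for i in trimstring:
--             if i == ')':
--                 a += '('
--             else:
--                 a += ')'
--         return a
--
--     if len(p) == 0 or correct(p):
--         return p
--     for i in range(1, len(p) + 1):
--         u, v = p[:i], p[i:]
--         if balanced(u) and balanced(v):
--             if not correct(u):
--                 return '(' + solution(v) + ')' + trimandreverse(u)
--             else:
--                 return u + solution(v)
--     return answer
-- ===== SOURCE B (Python) =====
-- def solution(p):
--     # One balance-counter pass per level (no repeated count() scans) and an explicit
--     # suffix stack instead of recursion; chunks are found by index, assembled at the end.
--     if p.count('(') != p.count(')'):
--         return ''
--     left = []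
--     tails = []
--     n = len(p)
--     i = 0
--     while i < n:
--         d = 0
--         ok = True
--         j = i
--         while True:
--             c = p[j]
--             if c == '(':
--                 d += 1
--             elif c == ')':
--                 d -= 1
--             if d < 0:
--                 ok = False
--             if d == 0 or j == n - 1:
--                 break
--             j += 1
--         u = p[i:j + 1]
--         i = j + 1
--         if ok:
--             left.append(u)
--         else:
--             left.append('(')
--             tails.append(')' + ''.join('(' if ch == ')' else ')' for ch in u[1:-1]))
--     return ''.join(left) + ''.join(reversed(tails))
-- ===== Notes on version B (the rewrite author's own statement) =====
-- stated objective: alternative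
-- what changed: Replaces A's per-candidate count() rescans and recursion with a single balance-counter pass per level that finds each minimal balanced chunk and its correctness flag in one scan, assembled iteratively with a suffix stack.
import Mathlib
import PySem

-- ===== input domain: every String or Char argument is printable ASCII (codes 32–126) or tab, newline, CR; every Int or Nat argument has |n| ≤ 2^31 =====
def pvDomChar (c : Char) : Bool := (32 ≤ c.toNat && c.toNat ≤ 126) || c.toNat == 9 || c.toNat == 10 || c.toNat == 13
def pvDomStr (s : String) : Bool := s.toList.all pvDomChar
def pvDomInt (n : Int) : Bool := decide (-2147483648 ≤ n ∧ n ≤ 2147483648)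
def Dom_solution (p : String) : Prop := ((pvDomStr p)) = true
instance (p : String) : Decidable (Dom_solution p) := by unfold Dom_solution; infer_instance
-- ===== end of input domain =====

-- B replaces A's repeated count() scans over every candidate prefix and its recursion by one
-- balance-counter pass per level plus an explicit suffix stack (objective: alternative).

-- ===== PORT A =====
-- helper 'balanced'
def pvBalanced (s : List Char) : Bool := PySem.Chars.count s ['('] == PySem.Chars.count s [')']

-- the 'for i in range(len(string))' loop of 'correct', with its two early returns
def pvCorrectGo : List Char → Int → Bool
  | [], garo => if garo != 0 then false else true
  | now :: rest, garo =>
    let garo := if now = '(' then garo + 1 else if now = ')' then garo - 1 else garo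
    if garo < 0 then false else pvCorrectGo rest garo

-- helper 'correct'
def pvCorrect (s : List Char) : Bool := if !pvBalanced s then false else pvCorrectGo s 0

-- helper 'trimandreverse'
def pvTrimAndReverse (s : List Char) : List Char :=
  let trimstring := PySem.List.slice s (some 1) (some ((s.length : Int) - 1))
  trimstring.foldl (fun a i => a ++ [if i = ')' then '(' else ')']) []

-- the 'for i in range(1, len(p) + 1)' search: first i with balanced u and balanced v
def pvFindSplit (p : List Char) : List Int → Option (List Char × List Char)
  | [] => none
  | i :: rest =>
    let u := PySem.List.slice p none (some i)
    let v := PySem.List.slice p (some i) none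
    if pvBalanced u && pvBalanced v then some (u, v) else pvFindSplit p rest

-- termination fact for pvSolutionList (cited in decreasing_by)
theorem pvFindSplit_v_lt (p : List Char) (hp : p ≠ []) :
    ∀ (l : List Int), (∀ i ∈ l, 1 ≤ i) → ∀ u v, pvFindSplit p l = some (u, v) →
      v.length < p.length := by
  intro l
  induction l with
  | nil => intro _ u v h; simp [pvFindSplit] at h
  | cons i rest ih =>
    intro hmem u v h
    simp only [pvFindSplit] at h
    split at h
    · have h1 : 1 ≤ i := hmem i (by simp)
      have hv : v = PySem.List.slice p (some i) none := by
        have := congrArg (fun o => o.map Prod.snd) h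
        simpa using this.symm
      subst hv
      rw [PySem.List.slice_some_none]
      have hc : 1 ≤ PySem.List.clampIdx p.length i := by
        have hlen : 1 ≤ p.length := List.length_pos_iff.mpr hp
        simp only [PySem.List.clampIdx]
        split
        · omega
        · have : (1 : Nat) ≤ i.toNat := by omega
          omega
      have hlen : 1 ≤ p.length := List.length_pos_iff.mpr hp
      simp only [List.length_drop]
      omega
    · exact ih (fun j hj => hmem j (by simp [hj])) u v h

def pvSolutionList (p : List Char) : List Char :=
  if h0 : p.length == 0 || pvCorrect p then p
  else
    match h : pvFindSplit p (PySem.List.pyRange 1 ((p.length : Int) + 1) 1) with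
    | some (u, v) =>
      if !pvCorrect u then '(' :: pvSolutionList v ++ ')' :: pvTrimAndReverse u
      else u ++ pvSolutionList v
    | none => []
termination_by p.length
decreasing_by
  all_goals
    exact pvFindSplit_v_lt p
      (by intro hnil; subst hnil; simp at h0)
      _ (by intro i hi; rw [PySem.List.mem_pyRange_one] at hi; omega) _ _ h

def solution (p : String) : String := String.ofList (pvSolutionList p.toList)

-- ===== PORT B =====
-- the inner 'for i in range(len(s))' scan of Source B: (chars consumed, ok flag)
def pvScan : List Char → Int → Bool → Nat → Nat × Bool
  | [], _, ok, i => (i, ok)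
  | c :: rest, d, ok, i =>
    let d := if c = '(' then d + 1 else if c = ')' then d - 1 else d
    let ok := if d < 0 then false else ok
    if d = 0 then (i + 1, ok) else pvScan rest d ok (i + 1)

-- termination facts for pvLoop (cited in decreasing_by)
theorem pvScan_fst_ge : ∀ (s : List Char) (d : Int) (ok : Bool) (i : Nat),
    i ≤ (pvScan s d ok i).1 := by
  intro s
  induction s with
  | nil => intro d ok i; simp [pvScan]
  | cons c rest ih =>
    intro d ok i
    simp only [pvScan]
    repeat' split
    all_goals first | omega | exact le_trans (by omega) (ih _ _ (i + 1))

theorem pvScan_fst_le : ∀ (s : List Char) (d : Int) (ok : Bool) (i : Nat),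
    (pvScan s d ok i).1 ≤ i + s.length := by
  intro s
  induction s with
  | nil => intro d ok i; simp [pvScan]
  | cons c rest ih =>
    intro d ok i
    simp only [pvScan, List.length_cons]
    repeat' split
    all_goals first | omega | exact le_trans (ih _ _ (i + 1)) (by omega)

theorem pvScan_fst_gt (c : Char) (rest : List Char) (d : Int) (ok : Bool) (i : Nat) :
    i < (pvScan (c :: rest) d ok i).1 := by
  simp only [pvScan]
  repeat' split
  all_goals first | omega | exact lt_of_lt_of_le (by omega) (pvScan_fst_ge rest _ _ (i + 1))

-- "'(' if ch == ')' else ')' for ch in u[1:-1]"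
def pvFlip (u : List Char) : List Char :=
  (PySem.List.slice u (some 1) (some (-1))).map (fun ch => if ch = ')' then '(' else ')')

-- the 'while s:' loop of Source B, with accumulators left and tails
def pvLoop : List Char → List (List Char) → List (List Char) → List Char
  | [], left, tails => left.flatten ++ tails.reverse.flatten
  | s@(c :: rest), left, tails =>
    let r := pvScan s 0 true 0
    let u := PySem.List.slice s none (some (r.1 : Int))
    let s' := PySem.List.slice s (some (r.1 : Int)) none
    if r.2 then pvLoop s' (left ++ [u]) tails
    else pvLoop s' (left ++ [['(']]) (tails ++ [')' :: pvFlip u])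
termination_by s => s.length
decreasing_by
  all_goals
  · rw [PySem.List.slice_from_natCast]
    simp only [List.length_drop]
    have h1 := pvScan_fst_gt c rest 0 true 0
    have h2 : (pvScan (c :: rest) 0 true 0).1 ≤ (c :: rest).length := by
      simpa using pvScan_fst_le (c :: rest) 0 true 0
    simp_all [List.length_cons]
    omega

def solution_alt (p : String) : String :=
  if PySem.Str.count p "(" != PySem.Str.count p ")" then ""
  else String.ofList (pvLoop p.toList [] [])

-- ===== PRECONDITION & SPEC =====
def Spec_solution (p : String) (out : String) : Prop := out = solution_alt p
instance (p : String) (out : String) : Decidable (Spec_solution p out) := by unfold Spec_solution; infer_instance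

-- ===== CLAIM (what is proved, stated in full; the proofs are below) =====
def Claim_equal_solution : Prop := ∀ (p : String), Dom_solution p → Spec_solution p (solution p)

-- ===== LEMMAS AND PROOFS =====


-- balance delta of one character, and of a string
def pvD (c : Char) : Int := if c = '(' then 1 else if c = ')' then -1 else 0

def pvBal (s : List Char) : Int := (s.map pvD).sum

-- all running sums (starting from d) stay nonnegative
def pvNN : Int → List Char → Bool
  | _, [] => true
  | d, c :: r => if d + pvD c < 0 then false else pvNN (d + pvD c) r

-- length of the shortest nonempty prefix whose balance cancels d (the common split oracle)
def pvFsp : Int → List Char → Option Nat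
  | _, [] => none
  | d, c :: r => if d + pvD c = 0 then some 1 else (pvFsp (d + pvD c) r).map (· + 1)

theorem pvStep_eq (c : Char) (g : Int) :
    (if c = '(' then g + 1 else if c = ')' then g - 1 else g) = g + pvD c := by
  unfold pvD; split_ifs <;> ring

theorem pvBal_cons (c : Char) (s : List Char) : pvBal (c :: s) = pvD c + pvBal s := by
  simp [pvBal]

theorem pvBal_append (a b : List Char) : pvBal (a ++ b) = pvBal a + pvBal b := by
  simp [pvBal]

theorem pvCount_go_single (c : Char) :
    ∀ (l : List Char) (fuel acc : Nat), l.length ≤ fuel →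
      PySem.Chars.count.go [c] fuel l acc = acc + l.count c := by
  intro l
  induction l with
  | nil => intro fuel acc _; cases fuel <;> simp [PySem.Chars.count.go]
  | cons h t ih =>
    intro fuel acc hf
    cases fuel with
    | zero => simp at hf
    | succ f =>
      simp only [PySem.Chars.count.go, List.isPrefixOf, List.count_cons]
      by_cases hc : c = h
      · subst hc
        simp only [beq_self_eq_true, Bool.true_and, List.isPrefixOf, if_true]
        rw [show [c].length = 1 from rfl, List.drop_one, List.tail_cons,
          ih f (acc + 1) (by simpa using hf)]
        omega
      · have hb : (c == h) = false := by simp [hc]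
        simp only [hb, Bool.false_and, if_false]
        rw [ih f acc (by simpa using hf)]
        simp [beq_iff_eq, Ne.symm hc]

theorem pvCount_single (c : Char) (s : List Char) :
    PySem.Chars.count s [c] = s.count c := by
  simp only [PySem.Chars.count, List.isEmpty_cons, Bool.false_eq_true, if_false]
  rw [pvCount_go_single c s s.length 0 le_rfl]
  omega

theorem pvBal_counts (s : List Char) :
    pvBal s = (s.count '(' : Int) - (s.count ')' : Int) := by
  induction s with
  | nil => simp [pvBal]
  | cons c r ih =>
    rw [pvBal_cons, ih]
    by_cases h1 : c = '('
    · subst h1; simp [pvD, List.count_cons]; ring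
    · by_cases h2 : c = ')'
      · subst h2; simp [pvD, List.count_cons]; ring
      · simp [pvD, h1, h2, List.count_cons, Ne.symm h1, Ne.symm h2]

theorem pvBalanced_eq (s : List Char) : pvBalanced s = decide (pvBal s = 0) := by
  unfold pvBalanced
  rw [pvCount_single, pvCount_single, pvBal_counts]
  by_cases h : s.count '(' = s.count ')'
  · rw [h]; simp
  · have h2 : ¬ ((s.count '(' : Int) - (s.count ')' : Int) = 0) := by omega
    simp [h, h2]

theorem pvNN_append : ∀ (a : List Char) (g : Int) (b : List Char),
    pvNN g (a ++ b) = (pvNN g a && pvNN (g + pvBal a) b) := by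
  intro a
  induction a with
  | nil => intro g b; simp [pvNN, pvBal]
  | cons c r ih =>
    intro g b
    simp only [List.cons_append, pvNN, pvBal_cons]
    split
    · simp
    · rw [ih]; ring_nf

theorem pvCorrectGo_eq : ∀ (l : List Char) (g : Int),
    pvCorrectGo l g = (pvNN g l && decide (g + pvBal l = 0)) := by
  intro l
  induction l with
  | nil =>
    intro g
    simp only [pvCorrectGo, pvNN, pvBal, List.map_nil, List.sum_nil, add_zero, Bool.true_and]
    by_cases h : g = 0 <;> simp [h]
  | cons c r ih =>
    intro g
    simp only [pvCorrectGo, pvStep_eq, pvNN, pvBal_cons]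
    split
    · simp
    · rw [ih]; ring_nf

theorem pvCorrect_eq (s : List Char) :
    pvCorrect s = (pvNN 0 s && decide (pvBal s = 0)) := by
  simp only [pvCorrect, pvBalanced_eq, pvCorrectGo_eq, zero_add]
  by_cases h : pvBal s = 0 <;> simp [h]

theorem pvCorrect_self (t : List Char) (h : pvCorrect t = true) : pvSolutionList t = t := by
  rw [pvSolutionList]
  simp [h]

theorem pvFsp_some : ∀ (s : List Char) (d : Int) (n : Nat), pvFsp d s = some n →
    1 ≤ n ∧ n ≤ s.length ∧ d + pvBal (s.take n) = 0 := by
  intro s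
  induction s with
  | nil => intro d n h; simp [pvFsp] at h
  | cons c r ih =>
    intro d n h
    simp only [pvFsp] at h
    split at h
    · cases h
      refine ⟨le_refl 1, by simp, ?_⟩
      simpa [pvBal_cons, pvBal] using (by assumption : d + pvD c = 0)
    · rcases Option.map_eq_some_iff.mp h with ⟨k, hk, rfl⟩
      obtain ⟨h1, h2, h3⟩ := ih _ _ hk
      refine ⟨by omega, by simp; omega, ?_⟩
      simpa [List.take_succ_cons, pvBal_cons] using by linarith [h3]

theorem pvFsp_min : ∀ (s : List Char) (d : Int) (n : Nat), pvFsp d s = some n →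
    ∀ m, 1 ≤ m → m < n → d + pvBal (s.take m) ≠ 0 := by
  intro s
  induction s with
  | nil => intro d n h; simp [pvFsp] at h
  | cons c r ih =>
    intro d n h m hm1 hmn
    simp only [pvFsp] at h
    by_cases hz : d + pvD c = 0
    · rw [if_pos hz] at h; cases h; omega
    · rw [if_neg hz] at h
      rcases Option.map_eq_some_iff.mp h with ⟨k, hk, rfl⟩
      rcases Nat.exists_eq_add_of_le hm1 with ⟨m', rfl⟩
      cases m' with
      | zero =>
        simpa [pvBal] using hz
      | succ m'' =>
        have := ih _ _ hk (m'' + 1) (by omega) (by omega)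
        simp only [show 1 + (m'' + 1) = m'' + 1 + 1 by omega, List.take_succ_cons, pvBal_cons]
        intro hcon
        exact this (by linarith)

theorem pvFsp_none : ∀ (s : List Char) (d : Int), pvFsp d s = none →
    ∀ m, 1 ≤ m → m ≤ s.length → d + pvBal (s.take m) ≠ 0 := by
  intro s
  induction s with
  | nil => intro d _ m hm1 hm2 _; simp at hm2; omega
  | cons c r ih =>
    intro d h m hm1 hm2
    simp only [pvFsp] at h
    by_cases hz : d + pvD c = 0
    · rw [if_pos hz] at h; simp at h
    · rw [if_neg hz] at h
      rcases Nat.exists_eq_add_of_le hm1 with ⟨m', rfl⟩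
      cases m' with
      | zero =>
        simpa [pvBal] using hz
      | succ m'' =>
        have := ih _ (Option.map_eq_none_iff.mp h) (m'' + 1) (by omega) (by simp at hm2 ⊢; omega)
        simp only [show 1 + (m'' + 1) = m'' + 1 + 1 by omega, List.take_succ_cons, pvBal_cons]
        intro hcon
        exact this (by linarith)

theorem pvFsp_exists (s : List Char) (d : Int) (hne : s ≠ []) (h : d + pvBal s = 0) :
    ∃ n, pvFsp d s = some n := by
  cases h' : pvFsp d s with
  | some n => exact ⟨n, rfl⟩
  | none =>
    exact absurd (by simpa using h) (pvFsp_none s d h' s.length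
      (List.length_pos_iff.mpr hne) le_rfl)

theorem pvScan_fst : ∀ (s : List Char) (d : Int) (ok : Bool) (i : Nat),
    (pvScan s d ok i).1 = i + (pvFsp d s).getD s.length := by
  intro s
  induction s with
  | nil => intro d ok i; simp [pvScan, pvFsp]
  | cons c r ih =>
    intro d ok i
    simp only [pvScan, pvStep_eq, pvFsp]
    split
    · simp
    · rw [ih]
      cases h : pvFsp (d + pvD c) r <;> simp [h] <;> omega

theorem pvScan_snd_false : ∀ (s : List Char) (d : Int) (i : Nat),
    (pvScan s d false i).2 = false := by
  intro s
  induction s with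
  | nil => intro d i; simp [pvScan]
  | cons c r ih =>
    intro d i
    simp only [pvScan]
    repeat' split
    all_goals simp [ih]

theorem pvScan_snd : ∀ (s : List Char) (d : Int) (ok : Bool) (i : Nat) (n : Nat),
    pvFsp d s = some n → (pvScan s d ok i).2 = (ok && pvNN d (s.take n)) := by
  intro s
  induction s with
  | nil => intro d ok i n h; simp [pvFsp] at h
  | cons c r ih =>
    intro d ok i n h
    simp only [pvFsp] at h
    simp only [pvScan, pvStep_eq]
    split at h
    · cases h
      simp only [List.take_succ_cons, List.take_zero, pvNN]
      have hlt : ¬ (d + pvD c < 0) := by rename_i hz; omega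
      simp [hlt, (by assumption : d + pvD c = 0)]
    · rcases Option.map_eq_some_iff.mp h with ⟨k, hk, rfl⟩
      have hnz : ¬ (d + pvD c = 0) := by assumption
      simp only [hnz, if_false, List.take_succ_cons, pvNN]
      by_cases hlt : d + pvD c < 0
      · simp only [hlt, if_true, if_pos hlt]
        rw [pvScan_snd_false]
        simp
      · simp only [hlt, if_false, if_neg hlt]
        exact ih _ ok _ _ hk

theorem pvFindSplit_skip (p : List Char) : ∀ (l1 l2 : List Int),
    pvFindSplit p l1 = none → pvFindSplit p (l1 ++ l2) = pvFindSplit p l2 := by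
  intro l1
  induction l1 with
  | nil => intro l2 _; rfl
  | cons i r ih =>
    intro l2 h
    simp only [pvFindSplit] at h ⊢
    split at h
    · simp at h
    · rename_i hc
      simp only [List.cons_append, pvFindSplit, hc, if_false]
      exact ih l2 h

theorem pvFindSplit_none (p : List Char) : ∀ (l : List Int),
    (∀ i ∈ l, (pvBalanced (PySem.List.slice p none (some i)) &&
               pvBalanced (PySem.List.slice p (some i) none)) = false) →
    pvFindSplit p l = none := by
  intro l
  induction l with
  | nil => intro _; rfl
  | cons i r ih =>
    intro h
    simp only [pvFindSplit, h i (by simp), if_false]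
    exact ih fun j hj => h j (by simp [hj])

theorem pvTest_eq (p : List Char) (m : Nat) (hbal : pvBal p = 0) :
    (pvBalanced (PySem.List.slice p none (some (m : Int))) &&
     pvBalanced (PySem.List.slice p (some (m : Int)) none)) =
    decide (pvBal (p.take m) = 0) := by
  rw [PySem.List.slice_to_natCast, PySem.List.slice_from_natCast,
    pvBalanced_eq, pvBalanced_eq]
  have hsum : pvBal (p.take m) + pvBal (p.drop m) = 0 := by
    rw [← pvBal_append, List.take_append_drop, hbal]
  by_cases h : pvBal (p.take m) = 0
  · have : pvBal (p.drop m) = 0 := by omega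
    simp [h, this]
  · simp [h]

theorem pvFindSplit_main (p : List Char) (hne : p ≠ []) (hbal : pvBal p = 0)
    (N : Nat) (hN : pvFsp 0 p = some N) :
    pvFindSplit p (PySem.List.pyRange 1 ((p.length : Int) + 1) 1) =
      some (p.take N, p.drop N) := by
  obtain ⟨h1, h2, h3⟩ := pvFsp_some p 0 N hN
  rw [PySem.List.pyRange_one_append 1 (N : Int) ((p.length : Int) + 1)
    (by exact_mod_cast h1) (by exact_mod_cast (by omega : N ≤ p.length + 1))]
  rw [pvFindSplit_skip]
  · rw [PySem.List.pyRange_one_cons (by exact_mod_cast (by omega : N < p.length + 1))]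
    simp only [pvFindSplit, pvTest_eq p N hbal]
    rw [if_pos (by simpa using h3)]
    rw [PySem.List.slice_to_natCast, PySem.List.slice_from_natCast]
  · apply pvFindSplit_none
    intro i hi
    rw [PySem.List.mem_pyRange_one] at hi
    have h0i : 0 ≤ i := by omega
    have : i = ((i.toNat : Nat) : Int) := by omega
    rw [this, pvTest_eq p i.toNat hbal]
    simp only [decide_eq_false_iff_not]
    exact pvFsp_min p 0 N hN i.toNat (by omega) (by omega) ∘ (by simpa using ·)

theorem pvTrimRev_eq (u : List Char) (h : u ≠ []) : pvTrimAndReverse u = pvFlip u := by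
  have hlen : 1 ≤ u.length := List.length_pos_iff.mpr h
  unfold pvTrimAndReverse pvFlip
  rw [PySem.List.foldl_append_singleton_eq_map, List.nil_append]
  congr 1
  have h1 : ((u.length : Int) - 1) = ((u.length - 1 : Nat) : Int) := by omega
  have e1 : PySem.List.slice u (some 1) (some ((u.length : Int) - 1)) =
      List.take (u.length - 1 - 1) (List.drop 1 u) := by
    rw [h1, show ((1 : Int)) = ((1 : Nat) : Int) from rfl, PySem.List.slice_natCast]
  have e2 : PySem.List.slice u (some 1) (some (-1)) =
      List.take (u.length - 1 - 1) (List.drop 1 u) := by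
    have c1 : PySem.List.clampIdx u.length 1 = 1 := by
      simp [PySem.List.clampIdx]; omega
    have c2 : PySem.List.clampIdx u.length (-1) = u.length - 1 := by simp
    simp only [PySem.List.slice, c1, c2]
  rw [e1, e2]

theorem pvA_step_ok (s : List Char) (N : Nat) (hne : s ≠ []) (hbal : pvBal s = 0)
    (hN : pvFsp 0 s = some N) (hnn : pvNN 0 (s.take N) = true) :
    pvSolutionList s = s.take N ++ pvSolutionList (s.drop N) := by
  obtain ⟨h1, h2, h3⟩ := pvFsp_some s 0 N hN
  have hbu : pvBal (s.take N) = 0 := by simpa using h3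
  have hbv : pvBal (s.drop N) = 0 := by
    have := pvBal_append (s.take N) (s.drop N)
    rw [List.take_append_drop, hbal] at this
    omega
  by_cases hc : pvCorrect s
  · have hnns : pvNN 0 s = true := by
      rw [pvCorrect_eq] at hc; simp at hc; exact hc.1
    have hcv : pvCorrect (s.drop N) = true := by
      rw [pvCorrect_eq]
      have := pvNN_append (s.take N) 0 (s.drop N)
      rw [List.take_append_drop, hnns] at this
      simp [hbu] at this
      simp [hbv, this.2]
    rw [pvCorrect_self s hc, pvCorrect_self _ hcv, List.take_append_drop]
  · rw [pvSolutionList]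
    rw [dif_neg (by simp [hc, List.length_eq_zero_iff, hne])]
    split
    · rename_i u v heq
      rw [pvFindSplit_main s hne hbal N hN] at heq
      cases heq
      have hcu : pvCorrect (s.take N) = true := by
        rw [pvCorrect_eq, hnn, hbu]; simp
      simp [hcu]
    · rename_i heq
      rw [pvFindSplit_main s hne hbal N hN] at heq
      cases heq

theorem pvA_step_bad (s : List Char) (N : Nat) (hne : s ≠ []) (hbal : pvBal s = 0)
    (hN : pvFsp 0 s = some N) (hnn : pvNN 0 (s.take N) = false) :
    pvSolutionList s =
      '(' :: pvSolutionList (s.drop N) ++ ')' :: pvTrimAndReverse (s.take N) := by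
  have hc : pvCorrect s = false := by
    rw [pvCorrect_eq]
    have := pvNN_append (s.take N) 0 (s.drop N)
    rw [List.take_append_drop, hnn] at this
    simp [this]
  rw [pvSolutionList]
  rw [dif_neg (by simp [hc, List.length_eq_zero_iff, hne])]
  split
  · rename_i u v heq
    rw [pvFindSplit_main s hne hbal N hN] at heq
    cases heq
    have hcu : pvCorrect (s.take N) = false := by
      rw [pvCorrect_eq, hnn]; simp
    simp [hcu]
  · rename_i heq
    rw [pvFindSplit_main s hne hbal N hN] at heq
    cases heq

theorem pvLoop_eq : ∀ (n : Nat) (s : List Char), s.length = n → pvBal s = 0 →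
    ∀ (left tails : List (List Char)),
      pvLoop s left tails = left.flatten ++ (pvSolutionList s ++ tails.reverse.flatten) := by
  intro n
  induction n using Nat.strong_induction_on with
  | _ n ih =>
    intro s hlen hbal left tails
    cases s with
    | nil =>
      rw [pvSolutionList]
      simp [pvLoop]
    | cons c rest =>
      have hne : (c :: rest : List Char) ≠ [] := by simp
      obtain ⟨N, hN⟩ := pvFsp_exists (c :: rest) 0 hne (by simpa using hbal)
      obtain ⟨h1, h2, h3⟩ := pvFsp_some _ _ _ hN
      have hfst : (pvScan (c :: rest) 0 true 0).1 = N := by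
        rw [pvScan_fst, hN]; simp
      have hsnd : (pvScan (c :: rest) 0 true 0).2 = pvNN 0 ((c :: rest).take N) := by
        rw [pvScan_snd _ _ _ _ _ hN]; simp
      have hbv : pvBal ((c :: rest).drop N) = 0 := by
        have := pvBal_append ((c :: rest).take N) ((c :: rest).drop N)
        rw [List.take_append_drop, hbal] at this
        have h4 : pvBal ((c :: rest).take N) = 0 := by simpa using h3
        omega
      have hvlen : ((c :: rest).drop N).length < n := by
        simp only [List.length_drop]
        omega
      rw [pvLoop]
      simp only [hfst, hsnd, PySem.List.slice_to_natCast, PySem.List.slice_from_natCast]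
      by_cases hnn : pvNN 0 ((c :: rest).take N) = true
      · rw [if_pos hnn, ih _ hvlen _ rfl hbv,
          pvA_step_ok (c :: rest) N hne hbal hN hnn]
        simp
      · rw [if_neg hnn, ih _ hvlen _ rfl hbv,
          pvA_step_bad (c :: rest) N hne hbal hN (by simpa using hnn)]
        simp [pvTrimRev_eq _ (by simp [List.take_eq_nil_iff]; omega : (c :: rest).take N ≠ [])]

theorem pvMain (l : List Char) :
    pvSolutionList l = (if pvBal l = 0 then pvLoop l [] [] else []) := by
  by_cases hbal : pvBal l = 0
  · rw [if_pos hbal, pvLoop_eq l.length l rfl hbal [] []]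
    simp
  · rw [if_neg hbal]
    cases l with
    | nil => exact absurd (by simp [pvBal]) hbal
    | cons c rest =>
      have hnone : pvFindSplit (c :: rest)
          (PySem.List.pyRange 1 (((c :: rest).length : Int) + 1) 1) = none := by
        apply pvFindSplit_none
        intro i hi
        rw [PySem.List.mem_pyRange_one] at hi
        have hcast : i = ((i.toNat : Nat) : Int) := by omega
        rw [hcast, PySem.List.slice_to_natCast, PySem.List.slice_from_natCast,
          pvBalanced_eq, pvBalanced_eq]
        have hsum : pvBal ((c :: rest).take i.toNat) + pvBal ((c :: rest).drop i.toNat) =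
            pvBal (c :: rest) := by
          rw [← pvBal_append, List.take_append_drop]
        by_cases h : pvBal ((c :: rest).take i.toNat) = 0
        · have : pvBal ((c :: rest).drop i.toNat) ≠ 0 := by omega
          simp [this]
        · simp [h]
      rw [pvSolutionList]
      rw [dif_neg (by simp [pvCorrect_eq, hbal])]
      split
      · rename_i u v heq
        rw [hnone] at heq
        cases heq
      · rfl

-- ===== VERDICT (by name: the statement is the Claim_ definition above) =====
theorem solution_spec : Claim_equal_solution := by
  intro p _
  unfold Spec_solution solution solution_alt
  rw [pvMain]
  simp only [PySem.Str.count_eq, show "(".toList = ['('] from rfl,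
    show ")".toList = [')'] from rfl, pvCount_single]
  by_cases hbal : pvBal p.toList = 0
  · have hc : p.toList.count '(' = p.toList.count ')' := by
      have := pvBal_counts p.toList; omega
    rw [if_pos hbal, if_neg (by simp [hc])]
  · have hc : p.toList.count '(' ≠ p.toList.count ')' := by
      have := pvBal_counts p.toList; omega
    rw [if_neg hbal, if_pos (by simp [hc])]
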